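-- pv_equiv track=rewrite | github.com/djanshuman/Algorithms-Data-Structures | LeetCode/TwoPointers/Minimum Window Substring - lexographically-smaller.py | get_minimum_window
-- ===== SOURCE A (Python) =====
-- def get_minimum_window(original: str, check: str) -> str:
--     # WRITE YOUR BRILLIANT CODE HERE
--     need = dict()
--
--     for c in check:
--         need[c] = need.get(c,0) + 1
--
--     have = dict()
--     found  = 0
--     left = 0
--     satisfied = len(need)
--     min_len = float("inf")
--     min_window = ""
--
--
--     for right in range(len(original)):
--         # 1. Expand window by adding original[right]
--         ele = original[right]
--         have[ele] = have.get(ele,0) + 1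
--
--         if ele in need and have[ele] == need[ele]:
--             found += 1
--
--         # 2. Shrink from left while window is valid
--         while found == satisfied:
--             curr_len = right - left + 1
--             curr_window = original[left:right+1]
--
--             # Update best: prefer shorter, then lexicographically smaller | if smaller len found then go-ahead other if similar found then
--             # check if curr window lexographically smaller then previous found
--             if (curr_len < min_len or (curr_len == min_len and curr_window < min_window)):
--                 min_len = curr_len
--                 min_window = curr_window
--
--             # Remove original[left] from window
--             left_ele = original[left]
--             have[left_ele] -=1
--
--             if left_ele in need and have[left_ele] < need[left_ele]:
--                 found -=1
--             left += 1
--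
--
--     return min_window
-- ===== SOURCE B (Python) =====
-- def _covers(window, check):
--     return all(window.count(c) >= check.count(c) for c in check)
--
--
-- def get_minimum_window(original: str, check: str) -> str:
--     # Try window lengths from len(check) upward; at the first length that has a
--     # valid window, return the lexicographically smallest one.
--     n = len(original)
--     for length in range(len(check), n + 1):
--         candidates = [original[s:s + length]
--                       for s in range(n - length + 1)
--                       if _covers(original[s:s + length], check)]
--         if candidates:
--             return min(candidates)
--     return ""
-- ===== Notes on version B (the rewrite author's own statement) =====
-- stated objective: alternative
-- what changed: Replaced the sliding-window/shrink loop with per-character need/have dicts by a direct search: try window lengths from len(check) upward and at the first length admitting a valid window return the lexicographically smallest one (validity checked with str.count, no dicts).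
-- outside the precondition, e.g. on get_minimum_window('ab', ''): A raises KeyError, B returns ''; on get_minimum_window('a', ''): A raises IndexError, B returns ''
import Mathlib
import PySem

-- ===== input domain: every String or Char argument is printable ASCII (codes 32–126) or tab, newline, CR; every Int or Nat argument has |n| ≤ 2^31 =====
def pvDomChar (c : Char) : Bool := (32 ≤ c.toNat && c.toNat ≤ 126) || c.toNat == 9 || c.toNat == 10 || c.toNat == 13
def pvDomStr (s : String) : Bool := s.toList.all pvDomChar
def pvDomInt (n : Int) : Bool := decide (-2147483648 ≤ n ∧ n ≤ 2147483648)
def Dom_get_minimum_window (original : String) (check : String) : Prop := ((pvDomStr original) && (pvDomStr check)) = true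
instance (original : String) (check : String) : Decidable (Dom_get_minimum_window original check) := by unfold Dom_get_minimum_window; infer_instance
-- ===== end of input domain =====

-- B tries window lengths from len(check) upward and returns the lexicographically
-- smallest valid window of the first feasible length — a direct search instead of
-- A's sliding-window shrink loop (objective: alternative, not faster).

-- ===== PORT A =====
-- state of A's loop: (have, found, left, min_len, min_window); min_len = float("inf")
-- is modeled as `none : Option Int` (only the comparisons of the Python are performed,
-- and `x < inf` is true, `x == inf` false — exact).
structure PvStA where
  haveD : PySem.Dict Char Int
  found : Int
  left : Int
  minLen : Option Int
  minWin : List Char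
  deriving Repr

-- the update test `curr_len < min_len or (curr_len == min_len and curr_window < min_window)`
def pvBetterA (curr_len : Int) (min_len : Option Int) (curr_w min_w : List Char) : Bool :=
  (match min_len with | none => true | some m => decide (curr_len < m)) ||
  ((min_len == some curr_len) && decide (curr_w < min_w))

-- the `while found == satisfied` shrink loop (fuel ≥ len(original)+1 suffices: left
-- grows each pass and the window is no longer valid once it is empty)
def pvShrinkA (o : List Char) (need : PySem.Dict Char Int) (satisfied : Int) (right : Int) :
    Nat → PvStA → PvStA
  | 0, st => st
  | (fuel+1), st =>
    if st.found = satisfied then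
      let curr_len : Int := right - st.left + 1
      let curr_window : List Char := PySem.List.slice o (some st.left) (some (right+1))
      let p :=
        if pvBetterA curr_len st.minLen curr_window st.minWin
        then (some curr_len, curr_window) else (st.minLen, st.minWin)
      -- original[left]: exact under Pre_ (while the loop runs, left is in range)
      let left_ele : Char := PySem.List.pyGetD o st.left ' '
      -- have[left_ele] -= 1: exact under Pre_ (the key is present: the char is in the window)
      let h2 := (st.haveD).insert left_ele ((st.haveD).getD left_ele 0 - 1)
      let f2 := if (need.contains left_ele) && decide (h2.getD left_ele 0 < need.getD left_ele 0)
                then st.found - 1 else st.found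
      pvShrinkA o need satisfied right fuel ⟨h2, f2, st.left + 1, p.1, p.2⟩
    else st

-- one pass of `for right in range(len(original))`
def pvStepA (o : List Char) (need : PySem.Dict Char Int) (satisfied : Int)
    (st : PvStA) (right : Int) : PvStA :=
  let ele : Char := PySem.List.pyGetD o right ' '   -- original[right]: right ∈ range(len), in range
  let h1 := st.haveD.insert ele (st.haveD.getD ele 0 + 1)
  let f1 := if need.contains ele && (h1.getD ele 0 == need.getD ele 0) then st.found + 1 else st.found
  pvShrinkA o need satisfied right (o.length + 1) ⟨h1, f1, st.left, st.minLen, st.minWin⟩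

def get_minimum_window (original : String) (check : String) : String :=
  let o := original.toList
  let need := check.toList.foldl (fun d c => d.insert c (d.getD c 0 + 1)) PySem.Dict.empty
  let satisfied : Int := (need.size : Int)
  let fin := (PySem.List.pyRange 0 o.length 1).foldl (pvStepA o need satisfied)
    ⟨PySem.Dict.empty, 0, 0, none, []⟩
  String.ofList fin.minWin

-- ===== PORT B =====
-- all(window.count(c) >= check.count(c) for c in check)
def pvCoversB (window chk : List Char) : Bool :=
  chk.all (fun c => decide (chk.count c ≤ window.count c))

-- `for length in range(len(check), n+1): … if candidates: return min(candidates)`;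
-- the early return becomes the recursion on the remaining lengths
-- the list comprehension `[original[s:s+length] for s in range(n-length+1) if _covers(...)]`
def pvCandsB (o chk : List Char) (n length : Int) : List (List Char) :=
  ((PySem.List.pyRange 0 (n - length + 1) 1).filter
      (fun s => pvCoversB (PySem.List.slice o (some s) (some (s + length))) chk)).map
    (fun s => PySem.List.slice o (some s) (some (s + length)))

def pvLoopB (o : List Char) (chk : List Char) (n : Int) : List Int → List Char
  | [] => []
  | (length :: rest) =>
    match PySem.List.min? (pvCandsB o chk n length) (fun w => w) with
    | some w => w
    | none => pvLoopB o chk n rest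

def get_minimum_window_alt (original : String) (check : String) : String :=
  let o := original.toList
  let chk := check.toList
  let n : Int := (o.length : Int)
  String.ofList (pvLoopB o chk n (PySem.List.pyRange (chk.length : Int) (n + 1) 1))

-- ===== PRECONDITION & SPEC =====
-- Pre_ excludes only the inputs on which A raises (KeyError/IndexError in the shrink
-- loop): an empty `check` together with a non-empty `original`.
def Pre_get_minimum_window (original : String) (check : String) : Prop :=
  check ≠ "" ∨ original = ""
instance (original : String) (check : String) : Decidable (Pre_get_minimum_window original check) := by
  unfold Pre_get_minimum_window; infer_instance

def pvWitness_get_minimum_window : String × String := ("ab", "b")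

def Spec_get_minimum_window (original : String) (check : String) (out : String) : Prop :=
  out = get_minimum_window_alt original check
instance (original : String) (check : String) (out : String) : Decidable (Spec_get_minimum_window original check out) := by
  unfold Spec_get_minimum_window; infer_instance

-- ===== CLAIM (what is proved, stated in full; the proofs are below) =====
def Claim_equal_get_minimum_window : Prop := ∀ (original : String) (check : String), Dom_get_minimum_window original check → Pre_get_minimum_window original check → Spec_get_minimum_window original check (get_minimum_window original check)

-- ===== LEMMAS AND PROOFS =====

-- the window original[s:e], as a list
def pvWin (o : List Char) (s e : Nat) : List Char := (o.drop s).take (e - s)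

-- "window w contains all characters of chk with multiplicity"
def pvValid (chk w : List Char) : Prop := ∀ c, chk.count c ≤ w.count c

-- the (length, lexicographic) strict order A and B both minimise
def pvWLt (w v : List Char) : Prop := w.length < v.length ∨ (w.length = v.length ∧ w < v)

-- "acc (ml, mw) is the minimum over the valid windows pvWin o s e with P s e"
def pvBestOver (o chk : List Char) (P : Nat → Nat → Prop) (ml : Option Int) (mw : List Char) : Prop :=
  match ml with
  | none => mw = [] ∧ ∀ s e, P s e → ¬ pvValid chk (pvWin o s e)
  | some L => L = (mw.length : Int) ∧ (∃ s e, P s e ∧ pvValid chk (pvWin o s e) ∧ mw = pvWin o s e) ∧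
      ∀ s e, P s e → pvValid chk (pvWin o s e) → mw = pvWin o s e ∨ pvWLt mw (pvWin o s e)

-- "r is the minimum over all valid contiguous substrings of o (none = there is none)"
def pvIsBest (o chk : List Char) : Option (List Char) → Prop
  | none => ∀ w, w <:+: o → ¬ pvValid chk w
  | some w => w <:+: o ∧ pvValid chk w ∧ ∀ v, v <:+: o → pvValid chk v → w = v ∨ pvWLt w v

-- ---- basic window facts ----
theorem pvWin_length (o : List Char) (s e : Nat) (he : e ≤ o.length) :
    (pvWin o s e).length = e - s := by
  simp [pvWin]; omega

theorem pvWin_infix (o : List Char) (s e : Nat) : pvWin o s e <:+: o :=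
  (List.take_prefix _ _).isInfix.trans (List.drop_suffix s o).isInfix

theorem pvInfix_eq_win (o w : List Char) (h : w <:+: o) :
    ∃ s e, e ≤ o.length ∧ s ≤ e ∧ w = pvWin o s e := by
  obtain ⟨t, u, hh⟩ := h
  refine ⟨t.length, t.length + w.length, ?_, by omega, ?_⟩
  · have := congrArg List.length hh
    simp [List.length_append] at this
    omega
  · rw [← hh]
    unfold pvWin
    rw [show t.length + w.length - t.length = w.length by omega]
    rw [List.append_assoc, List.drop_left, List.take_left]

theorem pvWin_snoc (o : List Char) (s r : Nat) (hs : s ≤ r) (hr : r < o.length) :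
    pvWin o s (r+1) = pvWin o s r ++ [o[r]] := by
  unfold pvWin
  rw [show r + 1 - s = (r - s) + 1 by omega, List.take_add_one]
  have h2 : (o.drop s)[r - s]? = some o[r] := by
    rw [List.getElem?_drop, show s + (r - s) = r by omega]
    exact List.getElem?_eq_getElem hr
  rw [h2]
  rfl

theorem pvWin_cons (o : List Char) (s e : Nat) (hs : s < e) (hso : s < o.length) :
    pvWin o s e = o[s] :: pvWin o (s+1) e := by
  unfold pvWin
  rw [List.drop_eq_getElem_cons hso, show e - s = (e - (s+1)) + 1 by omega,
    List.take_succ_cons]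

theorem pvWin_split (o : List Char) (l s e : Nat) (h1 : l ≤ s) (h2 : s ≤ e) :
    pvWin o l e = pvWin o l s ++ pvWin o s e := by
  unfold pvWin
  rw [show e - l = (s - l) + (e - s) by omega, List.take_add, List.drop_drop,
    show l + (s - l) = s by omega]

theorem pvValid_nil (chk : List Char) (h : chk ≠ []) : ¬ pvValid chk [] := by
  cases chk with
  | nil => exact absurd rfl h
  | cons c t => intro hv; simpa using hv c

theorem pvValid_length (chk w : List Char) (h : pvValid chk w) : chk.length ≤ w.length :=
  (List.subperm_ext_iff.mpr (fun x _ => h x)).length_le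

theorem pvValid_nonempty (chk w : List Char) (hchk : chk ≠ []) (h : pvValid chk w) : w ≠ [] := by
  intro hw; exact pvValid_nil chk hchk (hw ▸ h)

-- shrinking the window from the left can only lose characters
theorem pvValid_anti (o chk : List Char) (l s e : Nat) (h1 : l ≤ s) (h2 : s ≤ e)
    (h : ¬ pvValid chk (pvWin o l e)) : ¬ pvValid chk (pvWin o s e) := by
  intro hvs
  apply h
  intro c
  calc chk.count c ≤ (pvWin o s e).count c := hvs c
    _ ≤ (pvWin o l e).count c := by
        rw [pvWin_split o l s e h1 h2, List.count_append]; omega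

-- ---- the order ----
theorem pvWLt_trans {a b c : List Char} (h1 : pvWLt a b) (h2 : pvWLt b c) : pvWLt a c := by
  rcases h1 with h1 | ⟨e1, l1⟩ <;> rcases h2 with h2 | ⟨e2, l2⟩
  · exact Or.inl (by omega)
  · exact Or.inl (by omega)
  · exact Or.inl (by omega)
  · exact Or.inr ⟨by omega, lt_trans l1 l2⟩

theorem pvWLt_trichotomy (a b : List Char) : pvWLt a b ∨ a = b ∨ pvWLt b a := by
  rcases Nat.lt_trichotomy a.length b.length with h | h | h
  · exact Or.inl (Or.inl h)
  · rcases lt_trichotomy a b with h' | h' | h'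
    · exact Or.inl (Or.inr ⟨h, h'⟩)
    · exact Or.inr (Or.inl h')
    · exact Or.inr (Or.inr (Or.inr ⟨h.symm, h'⟩))
  · exact Or.inr (Or.inr (Or.inl h))

theorem pvWLt_asymm {a b : List Char} (h1 : pvWLt a b) (h2 : pvWLt b a) : False := by
  rcases h1 with h1 | ⟨e1, l1⟩ <;> rcases h2 with h2 | ⟨e2, l2⟩
  · omega
  · omega
  · omega
  · exact absurd l2 (lt_asymm l1)

theorem pvIsBest_unique (o chk : List Char) (r1 r2 : Option (List Char))
    (h1 : pvIsBest o chk r1) (h2 : pvIsBest o chk r2) : r1 = r2 := by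
  cases r1 with
  | none =>
    cases r2 with
    | none => rfl
    | some w2 => exact absurd h2.2.1 (h1 w2 h2.1)
  | some w1 =>
    cases r2 with
    | none => exact absurd h1.2.1 (h2 w1 h1.1)
    | some w2 =>
      have d1 := h1.2.2 w2 h2.1 h2.2.1
      have d2 := h2.2.2 w1 h1.1 h1.2.1
      rcases d1 with d1 | d1
      · rw [d1]
      · rcases d2 with d2 | d2
        · rw [d2]
        · exact (pvWLt_asymm d1 d2).elim

-- ---- counting satisfied characters ----
def pvSat (chk w : List Char) : Int :=
  ((PySem.List.dedup chk).countP (fun c => decide (chk.count c ≤ w.count c)) : Int)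

theorem pvSat_eq_iff (chk w : List Char) :
    pvSat chk w = (((PySem.List.dedup chk).length : Nat) : Int) ↔ pvValid chk w := by
  unfold pvSat
  constructor
  · intro h
    have h' : (PySem.List.dedup chk).countP (fun c => decide (chk.count c ≤ w.count c))
        = (PySem.List.dedup chk).length := by exact_mod_cast h
    have hall := List.countP_eq_length.mp h'
    intro c
    by_cases hc : c ∈ chk
    · simpa using hall c ((PySem.List.mem_dedup chk c).mpr hc)
    · simp [List.count_eq_zero_of_not_mem hc]
  · intro h
    have h' : (PySem.List.dedup chk).countP (fun c => decide (chk.count c ≤ w.count c))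
        = (PySem.List.dedup chk).length :=
      List.countP_eq_length.mpr (fun c _ => by simpa using h c)
    exact_mod_cast h'

theorem pvCountP_update (l : List Char) (hnd : l.Nodup) (p q : Char → Bool) (x : Char)
    (hagree : ∀ c, c ≠ x → p c = q c) (hx : x ∈ l) :
    (l.countP q : Int) = (l.countP p : Int) + (if q x then 1 else 0) - (if p x then 1 else 0) := by
  have hperm := List.perm_cons_erase hx
  have e1 : l.countP p = (l.erase x).countP p + (if p x then 1 else 0) := by
    rw [hperm.countP_eq]
    simp [List.countP_cons]
  have e2 : l.countP q = (l.erase x).countP q + (if q x then 1 else 0) := by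
    rw [hperm.countP_eq]
    simp [List.countP_cons]
  have e3 : (l.erase x).countP p = (l.erase x).countP q :=
    List.countP_congr (fun c hc => by
      have hne : c ≠ x := (hnd.mem_erase_iff.mp hc).1
      rw [hagree c hne])
  by_cases hp : p x <;> by_cases hq : q x <;> simp [hp, hq] at e1 e2 ⊢ <;> omega

theorem pvCountP_congr_out (l : List Char) (p q : Char → Bool) (x : Char)
    (hagree : ∀ c, c ≠ x → p c = q c) (hx : x ∉ l) :
    l.countP q = l.countP p :=
  (List.countP_congr (fun c hc => by
    have hne : c ≠ x := fun h => hx (h ▸ hc)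
    rw [hagree c hne])).symm

-- how pvSat changes when a character is appended on the right
theorem pvSat_snoc (chk w : List Char) (x : Char) :
    pvSat chk (w ++ [x]) =
      pvSat chk w + (if x ∈ chk ∧ w.count x + 1 = chk.count x then 1 else 0) := by
  have hcnt : ∀ c, (w ++ [x]).count c = w.count c + (if c = x then 1 else 0) := by
    intro c
    by_cases hcx : c = x
    · subst hcx; simp [List.count_append]
    · have hxc : ¬ x = c := fun h => hcx h.symm
      simp [List.count_append, hcx, hxc]
  unfold pvSat
  by_cases hx : x ∈ chk
  · have hupd := pvCountP_update (PySem.List.dedup chk) (PySem.List.nodup_dedup chk)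
      (fun c => decide (chk.count c ≤ w.count c))
      (fun c => decide (chk.count c ≤ (w ++ [x]).count c)) x
      (fun c hc => by simp [hcnt c, hc])
      ((PySem.List.mem_dedup chk x).mpr hx)
    rw [hupd]
    have hx1 : (w ++ [x]).count x = w.count x + 1 := by simp [hcnt x]
    by_cases hq : chk.count x ≤ w.count x + 1 <;> by_cases hp : chk.count x ≤ w.count x <;>
      simp [hx, hx1, hq] <;> omega
  · have heq := pvCountP_congr_out (PySem.List.dedup chk)
      (fun c => decide (chk.count c ≤ w.count c))
      (fun c => decide (chk.count c ≤ (w ++ [x]).count c)) x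
      (fun c hc => by simp [hcnt c, hc])
      (fun hmem => hx ((PySem.List.mem_dedup chk x).mp hmem))
    rw [heq]
    simp [hx]

-- how pvSat changes when the valid window loses its head
theorem pvSat_tail (chk w : List Char) (x : Char) (hval : pvValid chk (x :: w)) :
    pvSat chk w = pvSat chk (x :: w) - (if x ∈ chk ∧ w.count x < chk.count x then 1 else 0) := by
  have hcnt : ∀ c, (x :: w).count c = w.count c + (if c = x then 1 else 0) := by
    intro c
    by_cases hcx : c = x
    · subst hcx; simp
    · have hxc : ¬ x = c := fun h => hcx h.symm
      simp [hcx, hxc]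
  unfold pvSat
  by_cases hx : x ∈ chk
  · have hupd := pvCountP_update (PySem.List.dedup chk) (PySem.List.nodup_dedup chk)
      (fun c => decide (chk.count c ≤ (x :: w).count c))
      (fun c => decide (chk.count c ≤ w.count c)) x
      (fun c hc => by simp [hcnt c, hc])
      ((PySem.List.mem_dedup chk x).mpr hx)
    rw [hupd]
    have hp : chk.count x ≤ (x :: w).count x := hval x
    have hx1 : (x :: w).count x = w.count x + 1 := by simp [hcnt x]
    by_cases hq : chk.count x ≤ w.count x <;>
      simp [hx, hx1, hq, hp] <;> omega
  · have heq := pvCountP_congr_out (PySem.List.dedup chk)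
      (fun c => decide (chk.count c ≤ (x :: w).count c))
      (fun c => decide (chk.count c ≤ w.count c)) x
      (fun c hc => by simp [hcnt c, hc])
      (fun hmem => hx ((PySem.List.mem_dedup chk x).mp hmem))
    rw [heq]
    simp [hx]

-- ---- the accumulator ----
theorem pvBestOver_congr (o chk : List Char) (P Q : Nat → Nat → Prop) (ml : Option Int)
    (mw : List Char) (h : ∀ s e, P s e ↔ Q s e) (hb : pvBestOver o chk P ml mw) :
    pvBestOver o chk Q ml mw := by
  cases ml with
  | none =>
    simp only [pvBestOver] at hb ⊢
    exact ⟨hb.1, fun s e hq => hb.2 s e ((h s e).mpr hq)⟩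
  | some L =>
    simp only [pvBestOver] at hb ⊢
    obtain ⟨hL, ⟨s0, e0, hp0, hv0, hw0⟩, hdom⟩ := hb
    exact ⟨hL, ⟨s0, e0, (h s0 e0).mp hp0, hv0, hw0⟩,
      fun s e hq hv => hdom s e ((h s e).mpr hq) hv⟩

theorem pvBestOver_mono (o chk : List Char) (P Q : Nat → Nat → Prop) (ml : Option Int) (mw : List Char)
    (hPQ : ∀ s e, P s e → Q s e)
    (hdom : ∀ s e, Q s e → ¬ P s e → pvValid chk (pvWin o s e) →
      ∃ s' e', P s' e' ∧ pvValid chk (pvWin o s' e') ∧ pvWLt (pvWin o s' e') (pvWin o s e))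
    (h : pvBestOver o chk P ml mw) : pvBestOver o chk Q ml mw := by
  cases ml with
  | none =>
    simp only [pvBestOver] at h ⊢
    refine ⟨h.1, fun s e hq hv => ?_⟩
    by_cases hp : P s e
    · exact h.2 s e hp hv
    · obtain ⟨s', e', hp', hv', _⟩ := hdom s e hq hp hv
      exact h.2 s' e' hp' hv'
  | some L =>
    simp only [pvBestOver] at h ⊢
    obtain ⟨hL, ⟨s0, e0, hp0, hv0, hw0⟩, hd⟩ := h
    refine ⟨hL, ⟨s0, e0, hPQ s0 e0 hp0, hv0, hw0⟩, fun s e hq hv => ?_⟩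
    by_cases hp : P s e
    · exact hd s e hp hv
    · obtain ⟨s', e', hp', hv', hlt⟩ := hdom s e hq hp hv
      rcases hd s' e' hp' hv' with heq | hlt2
      · exact Or.inr (heq ▸ hlt)
      · exact Or.inr (pvWLt_trans hlt2 hlt)

theorem pvBestOver_update (o chk : List Char) (P : Nat → Nat → Prop) (ml : Option Int) (mw : List Char)
    (ln r : Nat) (hP : ¬ P ln r) (hv : pvValid chk (pvWin o ln r))
    (clen : Int) (hclen : clen = ((pvWin o ln r).length : Int))
    (h : pvBestOver o chk P ml mw) :
    pvBestOver o chk (fun s e => P s e ∨ (s = ln ∧ e = r))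
      (if pvBetterA clen ml (pvWin o ln r) mw then ((some clen : Option Int), pvWin o ln r) else (ml, mw)).1
      (if pvBetterA clen ml (pvWin o ln r) mw then ((some clen : Option Int), pvWin o ln r) else (ml, mw)).2 := by
  cases ml with
  | none =>
    simp only [pvBestOver] at h
    obtain ⟨hmw, hnone⟩ := h
    have hb : pvBetterA clen none (pvWin o ln r) mw = true := by simp [pvBetterA]
    simp only [hb, if_true]
    simp only [pvBestOver]
    refine ⟨hclen, ⟨ln, r, Or.inr ⟨rfl, rfl⟩, hv, rfl⟩, ?_⟩
    rintro s e (hp | ⟨rfl, rfl⟩) hv'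
    · exact absurd hv' (hnone s e hp)
    · exact Or.inl rfl
  | some L =>
    simp only [pvBestOver] at h
    obtain ⟨hL, hex, hdom⟩ := h
    have hbiff : pvBetterA clen (some L) (pvWin o ln r) mw = true ↔ pvWLt (pvWin o ln r) mw := by
      simp only [pvBetterA, pvWLt, hL, hclen, Bool.or_eq_true, Bool.and_eq_true,
        decide_eq_true_eq, beq_iff_eq, Option.some.injEq]
      constructor
      · rintro (h | ⟨he, hlt⟩)
        · left; exact_mod_cast h
        · right; exact ⟨by exact_mod_cast he.symm, hlt⟩
      · rintro (h | ⟨he, hlt⟩)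
        · left; exact_mod_cast h
        · right; exact ⟨by exact_mod_cast he.symm, hlt⟩
    by_cases hb : pvWLt (pvWin o ln r) mw
    · have hbt : pvBetterA clen (some L) (pvWin o ln r) mw = true := hbiff.mpr hb
      simp only [hbt, if_true]
      simp only [pvBestOver]
      refine ⟨hclen, ⟨ln, r, Or.inr ⟨rfl, rfl⟩, hv, rfl⟩, ?_⟩
      rintro s e (hp | ⟨rfl, rfl⟩) hv'
      · rcases hdom s e hp hv' with heq | hlt
        · exact Or.inr (heq ▸ hb)
        · exact Or.inr (pvWLt_trans hb hlt)
      · exact Or.inl rfl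
    · have hbf : pvBetterA clen (some L) (pvWin o ln r) mw = false :=
        Bool.eq_false_iff.mpr (fun hc => hb (hbiff.mp hc))
      simp only [hbf]
      simp only [pvBestOver]
      refine ⟨hL, ?_, ?_⟩
      · obtain ⟨s0, e0, hp0, hv0, hw0⟩ := hex
        exact ⟨s0, e0, Or.inl hp0, hv0, hw0⟩
      · rintro s e (hp | ⟨rfl, rfl⟩) hv'
        · exact hdom s e hp hv'
        · rcases pvWLt_trichotomy mw (pvWin o s e) with hlt | heq | hgt
          · exact Or.inr hlt
          · exact Or.inl heq
          · exact absurd hgt hb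

-- ===== A-side invariant =====
def pvInvA (o chk : List Char) (r : Nat) (st : PvStA) : Prop :=
  ∃ ln : Nat, st.left = (ln : Int) ∧ ln ≤ r ∧
    (∀ c, st.haveD.getD c 0 = ((pvWin o ln r).count c : Int)) ∧
    st.found = pvSat chk (pvWin o ln r) ∧
    (∀ s, s < ln → ∃ e, e ≤ r ∧ pvValid chk (pvWin o s e)) ∧
    pvBestOver o chk (fun _ e => e ≤ r) st.minLen st.minWin

-- ===== the shrink loop =====
theorem pvShrinkA_spec (o chk : List Char) (hchk : chk ≠ []) (r : Nat) (hr : r < o.length) :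
    ∀ (fuel : Nat) (st : PvStA) (ln : Nat),
      st.left = (ln : Int) →
      ln ≤ r + 1 →
      r + 2 ≤ fuel + ln →
      (∀ c, st.haveD.getD c 0 = ((pvWin o ln (r+1)).count c : Int)) →
      st.found = pvSat chk (pvWin o ln (r+1)) →
      (∀ s, s < ln → ∃ e, e ≤ r + 1 ∧ pvValid chk (pvWin o s e)) →
      pvBestOver o chk (fun s e => e ≤ r + 1 ∧ (e ≤ r ∨ s < ln)) st.minLen st.minWin →
      ∃ (st' : PvStA) (ln' : Nat),
        pvShrinkA o (PySem.Dict.counter chk) (((PySem.List.dedup chk).length : Nat) : Int) ((r : Nat) : Int) fuel st = st' ∧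
        st'.left = (ln' : Int) ∧ ln' ≤ r + 1 ∧
        (∀ c, st'.haveD.getD c 0 = ((pvWin o ln' (r+1)).count c : Int)) ∧
        st'.found = pvSat chk (pvWin o ln' (r+1)) ∧
        (∀ s, s < ln' → ∃ e, e ≤ r + 1 ∧ pvValid chk (pvWin o s e)) ∧
        pvBestOver o chk (fun s e => e ≤ r + 1 ∧ (e ≤ r ∨ s < ln')) st'.minLen st'.minWin ∧
        ¬ pvValid chk (pvWin o ln' (r+1)) := by
  intro fuel
  induction fuel with
  | zero => intro st ln _ h2 h3 _ _ _ _; omega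
  | succ fuel ih =>
    intro st ln hleft hln hfuel hcnt hfound hpass hbest
    by_cases hf : st.found = (((PySem.List.dedup chk).length : Nat) : Int)
    · -- the loop body runs: the current window is valid
      have hval : pvValid chk (pvWin o ln (r+1)) := by
        apply (pvSat_eq_iff chk _).mp
        rw [← hfound]; exact hf
      have hne := pvValid_nonempty chk _ hchk hval
      have hlen : (pvWin o ln (r+1)).length = r + 1 - ln := pvWin_length o ln (r+1) (by omega)
      have hlnr : ln ≤ r := by
        by_contra hcon
        exact hne (List.eq_nil_of_length_eq_zero (by omega))
      have hlno : ln < o.length := by omega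
      have hx : pvWin o ln (r+1) = o[ln] :: pvWin o (ln+1) (r+1) := pvWin_cons o ln (r+1) (by omega) hlno
      have hsl : PySem.List.slice o (some ((ln : Nat) : Int)) (some (((r : Nat) : Int) + 1)) = pvWin o ln (r+1) := by
        rw [show (((r : Nat) : Int) + 1) = (((r+1 : Nat)) : Int) by push_cast; ring]
        rw [PySem.List.slice_natCast]
        rfl
      have hge : PySem.List.pyGetD o ((ln : Nat) : Int) ' ' = o[ln] := by
        rw [PySem.List.pyGetD_natCast]
        exact List.getD_eq_getElem o ' ' hlno
      have key : pvShrinkA o (PySem.Dict.counter chk) (((PySem.List.dedup chk).length : Nat) : Int) ((r : Nat) : Int) (fuel+1) st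
          = pvShrinkA o (PySem.Dict.counter chk) (((PySem.List.dedup chk).length : Nat) : Int) ((r : Nat) : Int) fuel
            ⟨st.haveD.insert o[ln] (st.haveD.getD o[ln] 0 - 1),
             (if ((PySem.Dict.counter chk).contains o[ln] &&
                  decide ((st.haveD.insert o[ln] (st.haveD.getD o[ln] 0 - 1)).getD o[ln] 0 <
                    (PySem.Dict.counter chk).getD o[ln] 0))
              then st.found - 1 else st.found),
             ((ln : Nat) : Int) + 1,
             (if pvBetterA (((r : Nat) : Int) - ((ln : Nat) : Int) + 1) st.minLen (pvWin o ln (r+1)) st.minWin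
              then ((some (((r : Nat) : Int) - ((ln : Nat) : Int) + 1) : Option Int), pvWin o ln (r+1))
              else (st.minLen, st.minWin)).1,
             (if pvBetterA (((r : Nat) : Int) - ((ln : Nat) : Int) + 1) st.minLen (pvWin o ln (r+1)) st.minWin
              then ((some (((r : Nat) : Int) - ((ln : Nat) : Int) + 1) : Option Int), pvWin o ln (r+1))
              else (st.minLen, st.minWin)).2⟩ := by
        simp only [pvShrinkA]
        rw [if_pos hf, hleft, hsl, hge]
      rw [key]
      -- the new invariants, at left = ln + 1
      have hcnt' : ∀ c, (st.haveD.insert o[ln] (st.haveD.getD o[ln] 0 - 1)).getD c 0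
          = ((pvWin o (ln+1) (r+1)).count c : Int) := by
        intro c
        rw [PySem.Dict.getD_insert]
        by_cases hc : c = o[ln]
        · rw [if_pos hc, hcnt (o[ln]), hx, hc, List.count_cons_self]
          push_cast
          ring
        · rw [if_neg hc, hcnt c, hx, List.count_cons_of_ne (Ne.symm hc)]
      have hfound' : (if ((PySem.Dict.counter chk).contains o[ln] &&
            decide ((st.haveD.insert o[ln] (st.haveD.getD o[ln] 0 - 1)).getD o[ln] 0 <
              (PySem.Dict.counter chk).getD o[ln] 0))
          then st.found - 1 else st.found) = pvSat chk (pvWin o (ln+1) (r+1)) := by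
        rw [hcnt' o[ln], PySem.Dict.getD_counter, PySem.Dict.contains_counter]
        have hsat := pvSat_tail chk (pvWin o (ln+1) (r+1)) o[ln] (by rw [← hx]; exact hval)
        rw [← hx] at hsat
        rw [hsat, hfound]
        by_cases hmem : o[ln] ∈ chk
        · have hcont : chk.contains o[ln] = true := by simpa using hmem
          by_cases hlt : (pvWin o (ln+1) (r+1)).count o[ln] < chk.count o[ln]
          · simp [hmem, hlt]
          · have hlt' : ¬ (((pvWin o (ln+1) (r+1)).count o[ln] : Int) < (chk.count o[ln] : Int)) := by
              exact_mod_cast hlt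
            simp [hmem, hlt, hlt']
        · have hcont : chk.contains o[ln] = false := by simpa using hmem
          simp [hmem]
      have hpass' : ∀ s, s < ln + 1 → ∃ e, e ≤ r + 1 ∧ pvValid chk (pvWin o s e) := by
        intro s hs
        by_cases hsl2 : s < ln
        · exact hpass s hsl2
        · have : s = ln := by omega
          subst this
          exact ⟨r+1, le_rfl, hval⟩
      have hclen2 : (((r : Nat) : Int) - ((ln : Nat) : Int) + 1) = ((pvWin o ln (r+1)).length : Int) := by
        rw [hlen]; omega
      have hPneg : ¬ ((r + 1 ≤ r + 1) ∧ (r + 1 ≤ r ∨ ln < ln)) := by omega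
      have hupd := pvBestOver_update o chk (fun s e => e ≤ r + 1 ∧ (e ≤ r ∨ s < ln))
        st.minLen st.minWin ln (r+1) hPneg hval
        (((r : Nat) : Int) - ((ln : Nat) : Int) + 1) hclen2 hbest
      have hbest' := pvBestOver_congr o chk _ (fun s e => e ≤ r + 1 ∧ (e ≤ r ∨ s < ln + 1)) _ _
        (by
          intro s e
          constructor
          · rintro (⟨he, h'⟩ | ⟨rfl, rfl⟩)
            · refine ⟨he, ?_⟩; omega
            · exact ⟨le_rfl, by omega⟩
          · rintro ⟨he, h'⟩
            by_cases her : e ≤ r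
            · exact Or.inl ⟨he, Or.inl her⟩
            · by_cases hsl3 : s < ln
              · exact Or.inl ⟨he, Or.inr hsl3⟩
              · exact Or.inr ⟨by omega, by omega⟩)
        hupd
      exact ih _ (ln+1) (by push_cast; ring) (by omega) (by omega) hcnt' hfound' hpass' hbest'
    · -- the loop exits: found ≠ satisfied, hence the window is invalid
      simp only [pvShrinkA]
      rw [if_neg hf]
      refine ⟨st, ln, rfl, hleft, hln, hcnt, hfound, hpass, hbest, ?_⟩
      intro hv
      exact hf (by rw [hfound]; exact (pvSat_eq_iff chk _).mpr hv)

theorem pvStepA_spec (o chk : List Char) (hchk : chk ≠ []) (r : Nat) (hr : r < o.length)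
    (st : PvStA) (h : pvInvA o chk r st) :
    pvInvA o chk (r+1)
      (pvStepA o (PySem.Dict.counter chk) (((PySem.List.dedup chk).length : Nat) : Int) st ((r : Nat) : Int)) := by
  obtain ⟨ln, hleft, hln, hcnt, hfound, hpass, hbest⟩ := h
  have hger : PySem.List.pyGetD o ((r : Nat) : Int) ' ' = o[r] := by
    rw [PySem.List.pyGetD_natCast]
    exact List.getD_eq_getElem o ' ' hr
  have key : pvStepA o (PySem.Dict.counter chk) (((PySem.List.dedup chk).length : Nat) : Int) st ((r : Nat) : Int)
      = pvShrinkA o (PySem.Dict.counter chk) (((PySem.List.dedup chk).length : Nat) : Int) ((r : Nat) : Int) (o.length + 1)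
        ⟨st.haveD.insert o[r] (st.haveD.getD o[r] 0 + 1),
         (if ((PySem.Dict.counter chk).contains o[r] &&
              ((st.haveD.insert o[r] (st.haveD.getD o[r] 0 + 1)).getD o[r] 0 ==
                (PySem.Dict.counter chk).getD o[r] 0))
          then st.found + 1 else st.found),
         st.left, st.minLen, st.minWin⟩ := by
    simp only [pvStepA]
    rw [hger]
  rw [key]
  have hsnoc : pvWin o ln (r+1) = pvWin o ln r ++ [o[r]] := pvWin_snoc o ln r hln hr
  have hcnt1 : ∀ c, (st.haveD.insert o[r] (st.haveD.getD o[r] 0 + 1)).getD c 0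
      = ((pvWin o ln (r+1)).count c : Int) := by
    intro c
    rw [PySem.Dict.getD_insert, hsnoc]
    by_cases hc : c = o[r]
    · rw [if_pos hc, hcnt (o[r]), hc, List.count_append]
      simp
    · have hxc : ¬ o[r] = c := fun h => hc h.symm
      rw [if_neg hc, hcnt c, List.count_append]
      simp [hxc]
  have hfound1 : (if ((PySem.Dict.counter chk).contains o[r] &&
        ((st.haveD.insert o[r] (st.haveD.getD o[r] 0 + 1)).getD o[r] 0 ==
          (PySem.Dict.counter chk).getD o[r] 0))
      then st.found + 1 else st.found) = pvSat chk (pvWin o ln (r+1)) := by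
    rw [hcnt1 o[r], PySem.Dict.getD_counter, PySem.Dict.contains_counter]
    have hs := pvSat_snoc chk (pvWin o ln r) o[r]
    rw [← hsnoc] at hs
    rw [hs, hfound]
    have hcx : (pvWin o ln (r+1)).count o[r] = (pvWin o ln r).count o[r] + 1 := by
      rw [hsnoc]; simp [List.count_append]
    rw [hcx]
    by_cases hmem : o[r] ∈ chk
    · have hcont : chk.contains o[r] = true := by simpa using hmem
      by_cases heq2 : (pvWin o ln r).count o[r] + 1 = chk.count o[r]
      · have heq2' : (((pvWin o ln r).count o[r] : Int) + 1) = ((chk.count o[r] : Int)) := by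
          exact_mod_cast heq2
        simp [hmem, heq2]
      · have heq2' : ¬ ((((pvWin o ln r).count o[r] : Int) + 1) = ((chk.count o[r] : Int))) := by
          exact_mod_cast heq2
        simp [hmem, heq2, heq2']
    · have hcont : chk.contains o[r] = false := by simpa using hmem
      simp [hmem]
  have hpass1 : ∀ s, s < ln → ∃ e, e ≤ r + 1 ∧ pvValid chk (pvWin o s e) := by
    intro s hs
    obtain ⟨e, he, hv⟩ := hpass s hs
    exact ⟨e, by omega, hv⟩
  have hbest1 : pvBestOver o chk (fun s e => e ≤ r + 1 ∧ (e ≤ r ∨ s < ln)) st.minLen st.minWin := by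
    apply pvBestOver_mono o chk (fun _ e => e ≤ r) _ st.minLen st.minWin
      (fun s e he => ⟨by omega, Or.inl he⟩)
      (fun s e hq hnp hv => ?_) hbest
    have hnp' : ¬ e ≤ r := hnp
    have her : e = r + 1 := by omega
    subst her
    obtain ⟨e', he', hv'⟩ := hpass s (by rcases hq.2 with h' | h' <;> omega)
    have hne' := pvValid_nonempty chk _ hchk hv'
    have hlen1 : (pvWin o s e').length = e' - s := pvWin_length o s e' (by omega)
    have hse : s < e' := by
      by_contra hcon
      exact hne' (List.eq_nil_of_length_eq_zero (by omega))
    refine ⟨s, e', he', hv', Or.inl ?_⟩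
    rw [hlen1, pvWin_length o s (r+1) (by omega)]
    omega
  obtain ⟨st', ln', heq, hl', hln', hcnt', hfound', hpass', hbest', hinval⟩ :=
    pvShrinkA_spec o chk hchk r hr (o.length + 1)
      ⟨st.haveD.insert o[r] (st.haveD.getD o[r] 0 + 1),
       (if ((PySem.Dict.counter chk).contains o[r] &&
            ((st.haveD.insert o[r] (st.haveD.getD o[r] 0 + 1)).getD o[r] 0 ==
              (PySem.Dict.counter chk).getD o[r] 0))
        then st.found + 1 else st.found),
       st.left, st.minLen, st.minWin⟩ ln
      (by exact hleft) (by omega) (by omega) hcnt1 hfound1 hpass1 hbest1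
  rw [heq]
  refine ⟨ln', hl', hln', hcnt', hfound', hpass', ?_⟩
  apply pvBestOver_mono o chk (fun s e => e ≤ r + 1 ∧ (e ≤ r ∨ s < ln')) _ st'.minLen st'.minWin
    (fun s e hp => hp.1)
    (fun s e hq hnp hv => ?_) hbest'
  exfalso
  have hse : s < e := by
    by_contra hcon
    have hlen2 : (pvWin o s e).length = e - s := pvWin_length o s e (by omega)
    exact pvValid_nonempty chk _ hchk hv (List.eq_nil_of_length_eq_zero (by omega))
  have her1 : e = r + 1 := by omega
  have hsln : ln' ≤ s := by omega
  subst her1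
  exact pvValid_anti o chk ln' s (r+1) hsln (by omega) hinval hv

theorem pvA_best (o chk : List Char) (hchk : chk ≠ []) :
    ∃ res, pvIsBest o chk res ∧
      ((PySem.List.pyRange 0 o.length 1).foldl
          (pvStepA o (PySem.Dict.counter chk) (((PySem.List.dedup chk).length : Nat) : Int))
          ⟨PySem.Dict.empty, 0, 0, none, []⟩).minWin = res.getD [] := by
  have h0 : PySem.List.pyRange 0 (o.length : Int) 1 = (List.range o.length).map (fun k => ((k : Nat) : Int)) := by
    rw [PySem.List.pyRange_one]
    simp
  rw [h0, List.foldl_map]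
  have hinv : ∀ m, m ≤ o.length → pvInvA o chk m
      ((List.range m).foldl
        (fun st k => pvStepA o (PySem.Dict.counter chk) (((PySem.List.dedup chk).length : Nat) : Int) st ((k : Nat) : Int))
        ⟨PySem.Dict.empty, 0, 0, none, []⟩) := by
    intro m
    induction m with
    | zero =>
      intro _
      refine ⟨0, by simp, le_rfl, ?_, ?_, ?_, ?_⟩
      · intro c
        have hw0 : pvWin o 0 0 = [] := by simp [pvWin]
        rw [hw0]
        rfl
      · have hw0 : pvWin o 0 0 = [] := by simp [pvWin]
        rw [hw0]
        unfold pvSat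
        have : (PySem.List.dedup chk).countP (fun c => decide (chk.count c ≤ List.count c [])) = 0 := by
          apply List.countP_eq_zero.mpr
          intro c hc
          have hcm := (PySem.List.mem_dedup chk c).mp hc
          have hpos : 0 < chk.count c := List.count_pos_iff.mpr hcm
          simp
          omega
        rw [this]
        rfl
      · intro s hs
        exact absurd hs (by omega)
      · simp only [pvBestOver]
        refine ⟨rfl, fun s e he hv => ?_⟩
        have he0 : e = 0 := by omega
        subst he0
        have hw0 : pvWin o s 0 = [] := by simp [pvWin]
        rw [hw0] at hv
        exact pvValid_nil chk hchk hv
    | succ m ihm =>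
      intro hm1
      rw [List.range_succ, List.foldl_append, List.foldl_cons, List.foldl_nil]
      exact pvStepA_spec o chk hchk m (by omega) _ (ihm (by omega))
  obtain ⟨ln, _, _, _, _, _, hbest⟩ := hinv o.length le_rfl
  set stv := ((List.range o.length).foldl
    (fun st k => pvStepA o (PySem.Dict.counter chk) (((PySem.List.dedup chk).length : Nat) : Int) st ((k : Nat) : Int))
    ⟨PySem.Dict.empty, 0, 0, none, []⟩) with hstv
  cases hml : stv.minLen with
  | none =>
    rw [hml] at hbest
    simp only [pvBestOver] at hbest
    refine ⟨none, ?_, ?_⟩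
    · intro w hw hv
      obtain ⟨s, e, he, _, rfl⟩ := pvInfix_eq_win o w hw
      exact hbest.2 s e he hv
    · simpa using hbest.1
  | some L =>
    rw [hml] at hbest
    simp only [pvBestOver] at hbest
    obtain ⟨hL, ⟨s0, e0, he0, hv0, hw0⟩, hdom⟩ := hbest
    refine ⟨some stv.minWin, ⟨?_, ?_, ?_⟩, rfl⟩
    · rw [hw0]; exact pvWin_infix o s0 e0
    · rw [hw0]; exact hv0
    · intro v hvi hvv
      obtain ⟨s, e, he, _, rfl⟩ := pvInfix_eq_win o v hvi
      exact hdom s e he hvv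

-- ===== B-side =====
theorem pvCoversB_iff (w chk : List Char) : pvCoversB w chk = true ↔ pvValid chk w := by
  unfold pvCoversB
  rw [List.all_eq_true]
  constructor
  · intro h c
    by_cases hc : c ∈ chk
    · simpa using h c hc
    · simp [List.count_eq_zero_of_not_mem hc]
  · intro h c _
    simpa using h c

theorem pvCandsB_mem (o chk : List Char) (L : Nat) (w : List Char) :
    w ∈ pvCandsB o chk (o.length : Int) (L : Int) ↔
      ∃ s : Nat, s + L ≤ o.length ∧ pvCoversB (pvWin o s (s+L)) chk = true ∧ w = pvWin o s (s+L) := by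
  unfold pvCandsB
  simp only [List.mem_map, List.mem_filter, PySem.List.mem_pyRange_one]
  constructor
  · rintro ⟨s, ⟨⟨hs0, hsu⟩, hcov⟩, rfl⟩
    obtain ⟨sn, rfl⟩ := Int.eq_ofNat_of_zero_le hs0
    have hb : sn + L ≤ o.length := by omega
    have hsl : PySem.List.slice o (some ((sn : Nat) : Int)) (some (((sn : Nat) : Int) + (L : Int))) = pvWin o sn (sn+L) := by
      rw [show (((sn : Nat) : Int) + (L : Int)) = ((sn + L : Nat) : Int) by push_cast; ring,
        PySem.List.slice_natCast]
      rfl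
    exact ⟨sn, hb, by rw [← hsl]; exact hcov, hsl⟩
  · rintro ⟨sn, hb, hcov, rfl⟩
    have hsl : PySem.List.slice o (some ((sn : Nat) : Int)) (some (((sn : Nat) : Int) + (L : Int))) = pvWin o sn (sn+L) := by
      rw [show (((sn : Nat) : Int) + (L : Int)) = ((sn + L : Nat) : Int) by push_cast; ring,
        PySem.List.slice_natCast]
      rfl
    exact ⟨((sn : Nat) : Int), ⟨⟨by positivity, by omega⟩, by rw [hsl]; exact hcov⟩, hsl⟩

theorem pvLoopB_spec (o chk : List Char) :
    ∀ (k L : Nat), o.length + 1 ≤ L + k →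
      (∀ w, w <:+: o → pvValid chk w → L ≤ w.length) →
      ∃ res, pvIsBest o chk res ∧
        pvLoopB o chk (o.length : Int) (PySem.List.pyRange (L : Int) ((o.length : Int) + 1) 1) = res.getD [] := by
  intro k
  induction k with
  | zero =>
    intro L hk hL
    rw [PySem.List.pyRange_one_eq_nil (by omega)]
    refine ⟨none, ?_, rfl⟩
    intro w hw hv
    have h1 := hL w hw hv
    have h2 := hw.length_le
    omega
  | succ k ih =>
    intro L hk hL
    by_cases hLn : o.length + 1 ≤ L
    · rw [PySem.List.pyRange_one_eq_nil (by omega)]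
      refine ⟨none, ?_, rfl⟩
      intro w hw hv
      have h1 := hL w hw hv
      have h2 := hw.length_le
      omega
    · rw [PySem.List.pyRange_one_cons (a := (L : Int)) (b := (o.length : Int) + 1) (by omega)]
      rw [show ((L : Int) + 1) = ((L + 1 : Nat) : Int) by push_cast; ring]
      simp only [pvLoopB]
      cases hmin : PySem.List.min? (pvCandsB o chk (o.length : Int) (L : Int)) (fun w => w) with
      | none =>
        have hempty : pvCandsB o chk (o.length : Int) (L : Int) = [] :=
          (PySem.List.min?_eq_none_iff _ _).mp hmin
        have hnoL : ∀ w, w <:+: o → pvValid chk w → w.length ≠ L := by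
          intro w hw hv hwl
          obtain ⟨s, e, he, hse, rfl⟩ := pvInfix_eq_win o w hw
          have hlen := pvWin_length o s e he
          have heL : e = s + L := by omega
          subst heL
          have hmem : pvWin o s (s+L) ∈ pvCandsB o chk (o.length : Int) (L : Int) :=
            (pvCandsB_mem o chk L _).mpr ⟨s, by omega, (pvCoversB_iff _ _).mpr hv, rfl⟩
          rw [hempty] at hmem
          exact absurd hmem (List.not_mem_nil)
        obtain ⟨res, hbest, hres⟩ := ih (L+1) (by omega)
          (fun w hw hv => by
            have h1 := hL w hw hv
            have h2 := hnoL w hw hv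
            omega)
        exact ⟨res, hbest, hres⟩
      | some w =>
        obtain ⟨s, hb, hcov, rfl⟩ := (pvCandsB_mem o chk L _).mp (PySem.List.min?_mem hmin)
        have hwv : pvValid chk (pvWin o s (s+L)) := (pvCoversB_iff _ _).mp hcov
        have hwlen : (pvWin o s (s+L)).length = L := by
          rw [pvWin_length o s (s+L) hb]; omega
        refine ⟨some (pvWin o s (s+L)), ⟨pvWin_infix o s (s+L), hwv, ?_⟩, rfl⟩
        intro v hvi hvv
        have hvL := hL v hvi hvv
        by_cases hveq : v.length = L
        · obtain ⟨s', e', he', hse', rfl⟩ := pvInfix_eq_win o v hvi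
          have hlen' := pvWin_length o s' e' he'
          have heL' : e' = s' + L := by omega
          subst heL'
          have hmem' : pvWin o s' (s'+L) ∈ pvCandsB o chk (o.length : Int) (L : Int) :=
            (pvCandsB_mem o chk L _).mpr ⟨s', by omega, (pvCoversB_iff _ _).mpr hvv, rfl⟩
          have hdec : (LinearOrder.toDecidableLT : DecidableLT (List Char)) =
              (fun a b : List Char => a.decidableLT b) :=
            funext fun a => funext fun b => Subsingleton.elim _ _
          have hmin2 : @PySem.List.min? (List Char) (List Char) List.instLinearOrder.toLT
              LinearOrder.toDecidableLT (pvCandsB o chk (o.length : Int) (L : Int))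
              (fun w => w) = some (pvWin o s (s + L)) := by
            rw [hdec]; exact hmin
          have hle := PySem.List.min?_isMin hmin2 _ hmem'
          rcases lt_or_eq_of_le hle with hlt | heq
          · exact Or.inr (Or.inr ⟨by rw [hwlen, hveq], hlt⟩)
          · exact Or.inl heq
        · exact Or.inr (Or.inl (by rw [hwlen]; omega))

-- ===== assembly =====
theorem pvA_eq_B (original check : String) (hc : check ≠ "") :
    get_minimum_window original check = get_minimum_window_alt original check := by
  have hchk : check.toList ≠ [] := fun h => hc (String.toList_eq_nil_iff.mp h)
  obtain ⟨res, hb1, hA⟩ := pvA_best original.toList check.toList hchk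
  obtain ⟨res', hb2, hB⟩ := pvLoopB_spec original.toList check.toList
    (original.toList.length + 1) check.toList.length (by omega)
    (fun w _ hv => pvValid_length _ _ hv)
  have hres := pvIsBest_unique _ _ _ _ hb1 hb2
  have hsize : ((PySem.Dict.counter check.toList).size : Int) = (((PySem.List.dedup check.toList).length : Nat) : Int) := by
    have h1 : (PySem.Dict.counter check.toList).keys.length = (PySem.Dict.counter check.toList).size := by
      simp [PySem.Dict.keys, PySem.Dict.size]
    rw [← h1, PySem.Dict.keys_counter, ← PySem.List.dedup_eq_ofList]
  have eA : get_minimum_window original check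
      = String.ofList ((PySem.List.pyRange 0 (original.toList.length : Int) 1).foldl
          (pvStepA original.toList (PySem.Dict.counter check.toList)
            ((PySem.Dict.counter check.toList).size : Int))
          ⟨PySem.Dict.empty, 0, 0, none, []⟩).minWin := by
    simp only [get_minimum_window]
    rw [PySem.Dict.foldl_insert_getD_add_one_eq_counter]
  have eB : get_minimum_window_alt original check
      = String.ofList (pvLoopB original.toList check.toList (original.toList.length : Int)
          (PySem.List.pyRange (check.toList.length : Int) ((original.toList.length : Int) + 1) 1)) := by
    simp only [get_minimum_window_alt]
  rw [eA, eB, hsize, hA, hB, hres]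



-- ===== VERDICT (by name: the statement is the Claim_ definition above) =====
theorem get_minimum_window_spec : Claim_equal_get_minimum_window := by
  intro original check _ hpre
  unfold Spec_get_minimum_window
  by_cases hc : check = ""
  · subst hc
    rcases hpre with h | h
    · exact absurd rfl h
    · subst h; rfl
  · exact pvA_eq_B original check hc
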